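-- pv_equiv track=rewrite | github.com/jdellape/streamlit | practical-business-streamlit/hr/org_chart/app.py | find_all_reports_with_managers
-- ===== SOURCE A (Python) =====
-- def find_all_reports_with_managers(hierarchy, manager_id):
--     reports = []
--
--     if manager_id in hierarchy:
--         direct_reports = hierarchy[manager_id].get("subordinates", [])
--
--         for report in direct_reports:
--             reports.append((manager_id, report))
--             reports.extend(find_all_reports_with_managers(hierarchy, report))
--
--     return reports
-- ===== SOURCE B (Python) =====
-- def find_all_reports_with_managers(hierarchy, manager_id):
--     # Iterative pre-order DFS with an explicit stack of (manager, report) edges.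
--     reports = []
--     stack = []
--     if manager_id in hierarchy:
--         for report in reversed(hierarchy[manager_id].get("subordinates", [])):
--             stack.append((manager_id, report))
--     while stack:
--         manager, report = stack.pop()
--         reports.append((manager, report))
--         if report in hierarchy:
--             for child in reversed(hierarchy[report].get("subordinates", [])):
--                 stack.append((report, child))
--     return reports
-- ===== Notes on version B (the rewrite author's own statement) =====
-- stated objective: alternative
-- what changed: Replaced the recursive tree walk by an iterative pre-order DFS over an explicit stack of (manager, report) edges (children pushed in reverse to keep the exact emission order).
import Mathlib
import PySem

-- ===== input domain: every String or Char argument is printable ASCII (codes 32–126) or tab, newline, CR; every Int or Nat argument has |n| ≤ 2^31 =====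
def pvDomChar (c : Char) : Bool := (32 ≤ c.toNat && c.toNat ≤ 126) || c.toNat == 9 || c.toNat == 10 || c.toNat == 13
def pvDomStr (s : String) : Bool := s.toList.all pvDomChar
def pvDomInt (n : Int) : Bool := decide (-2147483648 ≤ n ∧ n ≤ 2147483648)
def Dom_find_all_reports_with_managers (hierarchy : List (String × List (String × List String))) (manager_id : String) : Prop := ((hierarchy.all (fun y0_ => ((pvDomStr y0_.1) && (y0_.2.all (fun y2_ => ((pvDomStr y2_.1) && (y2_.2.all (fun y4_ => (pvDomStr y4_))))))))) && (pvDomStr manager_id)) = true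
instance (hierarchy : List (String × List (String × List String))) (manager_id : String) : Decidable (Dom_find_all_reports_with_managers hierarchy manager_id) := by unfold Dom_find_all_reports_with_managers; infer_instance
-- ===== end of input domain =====

-- B replaces A's recursion by an iterative pre-order DFS over an explicit stack of edges; same output.

-- ===== PORT A =====
-- Fueled transliteration of A's recursion; the Nat fuel is only a totality guard, never
-- exhausted on inputs where the Python returns (recursion depth ≤ #keys + 1 on acyclic input).
def farmA (h : List (String × List (String × List String))) : Nat → String → List (String × String)
  | 0, _ => []
  | n+1, m =>
    match PySem.Dict.get? (PySem.Dict.mk h) m with          -- 'if manager_id in hierarchy'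
    | none => []                                            -- 'reports = []' returned unchanged
    | some inner =>
      -- direct_reports = hierarchy[manager_id].get("subordinates", [])
      (PySem.Dict.getD (PySem.Dict.mk inner) "subordinates" []).foldl
        (fun reports report => reports ++ [(m, report)] ++ farmA h n report) []

def find_all_reports_with_managers (hierarchy : List (String × List (String × List String))) (manager_id : String) : List (String × String) :=
  farmA hierarchy (hierarchy.length + 1) manager_id

-- ===== PORT B =====
-- Stack model: head of the list is the top of the stack; pushing the reversed children
-- one by one (as Source B does) is prepending the children in their original order.
-- Each edge carries the same Nat depth budget as port A's fuel (totality guard only).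
def stackMeas (L : Nat) : List (Nat × String × String) → Nat
  | [] => 0
  | (n, _, _) :: rest => (L+1)^n + stackMeas L rest

def childBound (h : List (String × List (String × List String))) : Nat :=
  h.foldl (fun a p => max a (PySem.Dict.getD (PySem.Dict.mk p.2) "subordinates" []).length) 0

theorem le_foldl_max (g : (String × List (String × List String)) → Nat) :
    ∀ (l : List (String × List (String × List String))) (a b : Nat), a ≤ b →
    a ≤ l.foldl (fun acc p => max acc (g p)) b := by
  intro l
  induction l with
  | nil => intro a b hab; simpa using hab
  | cons q tl ih => intro a b hab; exact ih a _ (le_trans hab (Nat.le_max_left _ _))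

theorem childBound_le : ∀ (h : List (String × List (String × List String))) (r : String)
    (inner : List (String × List String)) (acc : Nat),
    PySem.Dict.get? (PySem.Dict.mk h) r = some inner →
    (PySem.Dict.getD (PySem.Dict.mk inner) "subordinates" []).length ≤
      h.foldl (fun a p => max a (PySem.Dict.getD (PySem.Dict.mk p.2) "subordinates" []).length) acc := by
  intro h
  induction h with
  | nil => intro r inner acc hg; simp [PySem.Dict.get?] at hg
  | cons p t ih =>
    intro r inner acc hg
    rw [PySem.Dict.get?_mk_cons] at hg
    by_cases hk : p.1 == r
    · simp only [hk, if_pos] at hg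
      cases hg
      exact le_foldl_max _ t _ _ (Nat.le_max_right _ _)
    · simp only [hk, if_neg, Bool.false_eq_true, not_false_iff] at hg
      exact ih r inner _ hg

def stackLoop (h : List (String × List (String × List String))) :
    List (Nat × String × String) → List (String × String) → List (String × String)
  | [], reports => reports
  | (0, m, r) :: rest, reports =>          -- fuel exhausted: emit the edge, expand nothing (never reached under Pre_)
    stackLoop h rest (reports ++ [(m, r)])
  | (n'+1, m, r) :: rest, reports =>
    match hg : PySem.Dict.get? (PySem.Dict.mk h) r with    -- 'if report in hierarchy'
    | some inner =>
      stackLoop h ((PySem.Dict.getD (PySem.Dict.mk inner) "subordinates" []).map (fun c => (n', r, c)) ++ rest)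
        (reports ++ [(m, r)])
    | none => stackLoop h rest (reports ++ [(m, r)])
  termination_by st _ => stackMeas (childBound h) st
  decreasing_by
  · simp [stackMeas]
  · have hlen := childBound_le h r inner 0 hg
    have hsum : ∀ (xs : List String) (k : Nat) (rest : List (Nat × String × String)),
        stackMeas (childBound h) (xs.map (fun c => (k, r, c)) ++ rest)
          = xs.length * (childBound h + 1)^k + stackMeas (childBound h) rest := by
      intro xs k rest
      induction xs with
      | nil => simp [stackMeas]
      | cons x t ih => simp [stackMeas, ih, Nat.succ_mul]; ring
    rw [hsum]
    have h1 : (PySem.Dict.getD (PySem.Dict.mk inner) "subordinates" []).length * (childBound h + 1) ^ n'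
        < (childBound h + 1) ^ (n' + 1) := by
      calc (PySem.Dict.getD (PySem.Dict.mk inner) "subordinates" []).length * (childBound h + 1) ^ n'
          ≤ childBound h * (childBound h + 1) ^ n' := Nat.mul_le_mul_right _ hlen
        _ < (childBound h + 1) * (childBound h + 1) ^ n' := by
            have hp : (0:ℕ) < (childBound h + 1) ^ n' := Nat.pow_pos (Nat.succ_pos _)
            exact (Nat.mul_lt_mul_right hp).mpr (Nat.lt_succ_self _)
        _ = (childBound h + 1) ^ (n' + 1) := by ring
    simp only [stackMeas, Nat.succ_eq_add_one]
    omega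
  · simp [stackMeas]

def find_all_reports_with_managers_alt (hierarchy : List (String × List (String × List String))) (manager_id : String) : List (String × String) :=
  let stack : List (Nat × String × String) :=
    match PySem.Dict.get? (PySem.Dict.mk hierarchy) manager_id with
    | some inner => (PySem.Dict.getD (PySem.Dict.mk inner) "subordinates" []).map
        (fun c => (hierarchy.length, manager_id, c))
    | none => []
  stackLoop hierarchy stack []

-- ===== PRECONDITION & SPEC =====
-- Helpers for Pre_: bounded reachability in the subordinate graph (never used by the ports).
def pvSubs (h : List (String × List (String × List String))) (k : String) : List String :=
  match PySem.Dict.get? (PySem.Dict.mk h) k with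
  | some inner => PySem.Dict.getD (PySem.Dict.mk inner) "subordinates" []
  | none => []

def pvReach (h : List (String × List (String × List String))) (n : Nat) (s : List String) : List String :=
  Nat.iterate (fun t => (t ++ t.flatMap (pvSubs h)).dedup) n s

-- Pre_: no key reachable from manager_id lies on a subordinate-graph cycle — exactly
-- the inputs on which the Python A terminates (on a reachable cycle A raises RecursionError).
def Pre_find_all_reports_with_managers (hierarchy : List (String × List (String × List String))) (manager_id : String) : Prop :=
  ∀ k ∈ pvReach hierarchy (hierarchy.length + 1) [manager_id],
    k ∉ pvReach hierarchy (hierarchy.length + 1) (pvSubs hierarchy k)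
instance (hierarchy : List (String × List (String × List String))) (manager_id : String) : Decidable (Pre_find_all_reports_with_managers hierarchy manager_id) := by unfold Pre_find_all_reports_with_managers; infer_instance

def pvWitness_find_all_reports_with_managers : (List (String × List (String × List String))) × String :=
  ([("a", [("subordinates", ["b"])])], "a")

def Spec_find_all_reports_with_managers (hierarchy : List (String × List (String × List String))) (manager_id : String) (out : List (String × String)) : Prop := out = find_all_reports_with_managers_alt hierarchy manager_id
instance (hierarchy : List (String × List (String × List String))) (manager_id : String) (out : List (String × String)) : Decidable (Spec_find_all_reports_with_managers hierarchy manager_id out) := by unfold Spec_find_all_reports_with_managers; infer_instance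

-- ===== CLAIM (what is proved, stated in full; the proofs are below) =====
def Claim_equal_find_all_reports_with_managers : Prop := ∀ (hierarchy : List (String × List (String × List String))) (manager_id : String), Dom_find_all_reports_with_managers hierarchy manager_id → Pre_find_all_reports_with_managers hierarchy manager_id → Spec_find_all_reports_with_managers hierarchy manager_id (find_all_reports_with_managers hierarchy manager_id)

-- ===== LEMMAS AND PROOFS =====

-- A's loop body in flatMap form.
theorem farmA_succ (h : List (String × List (String × List String))) (n : Nat) (m : String) :
    farmA h (n+1) m = match PySem.Dict.get? (PySem.Dict.mk h) m with
      | none => []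
      | some inner => (PySem.Dict.getD (PySem.Dict.mk inner) "subordinates" []).flatMap
          (fun report => (m, report) :: farmA h n report) := by
  rw [farmA]
  cases PySem.Dict.get? (PySem.Dict.mk h) m with
  | none => rfl
  | some inner =>
    simp only
    have := PySem.List.foldl_append_eq_flatMap
      (l := PySem.Dict.getD (PySem.Dict.mk inner) "subordinates" [])
      (g := fun report => (m, report) :: farmA h n report) (acc := [])
    simpa using this

-- The stack machine computes: emitted reports so far ++ the pre-order expansion of each
-- stacked edge ((m,r) followed by the fueled subtree of r).
theorem stackLoop_flatMap (h : List (String × List (String × List String))) :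
    ∀ (st : List (Nat × String × String)) (reports : List (String × String)),
    stackLoop h st reports = reports ++ st.flatMap (fun e => (e.2.1, e.2.2) :: farmA h e.1 e.2.2) := by
  intro st reports
  induction st, reports using stackLoop.induct h with
  | case1 reports => rw [stackLoop]; simp
  | case2 m r rest reports ih =>
    rw [stackLoop, ih]
    simp [farmA]
  | case3 n' m r rest reports inner hg ih =>
    rw [stackLoop, hg]
    simp [ih, farmA_succ, hg, List.flatMap_append, List.flatMap_map]
  | case4 n' m r rest reports hg ih =>
    rw [stackLoop, hg]
    simp [ih, farmA_succ, hg]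

theorem ports_agree (h : List (String × List (String × List String))) (m : String) :
    find_all_reports_with_managers h m = find_all_reports_with_managers_alt h m := by
  unfold find_all_reports_with_managers find_all_reports_with_managers_alt
  rw [farmA_succ]
  cases hg : PySem.Dict.get? (PySem.Dict.mk h) m with
  | none => simp [stackLoop_flatMap]
  | some inner => simp [stackLoop_flatMap, List.flatMap_map]

-- ===== VERDICT (by name: the statement is the Claim_ definition above) =====
theorem find_all_reports_with_managers_spec : Claim_equal_find_all_reports_with_managers := by
  intro h m _ _
  exact ports_agree h m
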